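-- pv_equiv track=rewrite | github.com/quezak/alexa-locations | pathgen.py | rebuild_path
-- ===== SOURCE A (Python) =====
-- def rebuild_path(path_from, end):
--     """ Retrace the path that led Dijkstra to end and return it. """
--     path = [end, ]
--     node = end
--     while node != path_from[node]:
--         node = path_from[node]
--         path.append(node)
--     path.reverse()
--     return path
-- ===== SOURCE B (Python) =====
-- def rebuild_path(path_from, end):
--     """ Retrace the path that led Dijkstra to end and return it.
--     Tail-recursive climb that PREPENDS each node to an accumulator,
--     so the path comes out in forward order with no reverse step. """
--     def climb(node, acc):
--         acc = [node] + acc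
--         parent = path_from[node]
--         if parent == node:
--             return acc
--         return climb(parent, acc)
--     return climb(end, [])
-- ===== Notes on version B (the rewrite author's own statement) =====
-- stated objective: alternative
-- what changed: Replaced the append-then-reverse while loop by a tail-recursive climb that prepends each node to an accumulator, producing the path in forward order directly with no reverse pass.
import Mathlib
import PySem

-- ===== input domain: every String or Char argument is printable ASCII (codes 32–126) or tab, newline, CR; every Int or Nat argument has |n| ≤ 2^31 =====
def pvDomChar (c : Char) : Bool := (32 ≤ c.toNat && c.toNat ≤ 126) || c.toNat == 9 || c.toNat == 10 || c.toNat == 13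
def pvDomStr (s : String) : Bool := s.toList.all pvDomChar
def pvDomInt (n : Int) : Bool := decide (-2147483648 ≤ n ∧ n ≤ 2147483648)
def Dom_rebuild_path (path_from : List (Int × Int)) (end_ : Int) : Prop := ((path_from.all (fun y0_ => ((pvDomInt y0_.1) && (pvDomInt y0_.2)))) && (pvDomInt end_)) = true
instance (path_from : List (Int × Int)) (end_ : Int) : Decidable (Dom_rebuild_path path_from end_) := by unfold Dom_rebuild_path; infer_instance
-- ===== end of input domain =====

-- ===== PORT A =====
-- B replaces the append-then-reverse loop by a tail-recursive prepend-accumulator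
-- climb; equivalence is proved on Pre_ (the parent chain reaches a self-parent root).
-- A's while loop, state (node, path) as in the Python; fuel makes it total (on fuel
-- exhaustion or KeyError it stops — such inputs are outside Pre_).
-- path_from[node] is a Python dict lookup: PySem.Dict first-match semantics.
def pvALoop (path_from : List (Int × Int)) : Nat → Int → List Int → List Int
  | 0, _, path => path
  | fuel + 1, node, path =>
    match (PySem.Dict.mk path_from).get? node with
    | none => path
    | some p => if node = p then path else pvALoop path_from fuel p (path ++ [p])

def rebuild_path (path_from : List (Int × Int)) (end_ : Int) : List Int :=
  (pvALoop path_from (path_from.length + 1) end_ [end_]).reverse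

-- ===== PORT B =====
-- Source B's inner climb: prepend node, look the parent up (first matching pair of the
-- association list = Python dict lookup), stop at a self-parent; fuel makes it total.
def pvClimb (path_from : List (Int × Int)) : Nat → Int → List Int → List Int
  | 0, node, acc => node :: acc
  | fuel + 1, node, acc =>
    ((path_from.find? (fun kv => kv.1 == node)).map Prod.snd).elim (node :: acc)
      (fun parent =>
        if parent = node then node :: acc else pvClimb path_from fuel parent (node :: acc))

def rebuild_path_alt (path_from : List (Int × Int)) (end_ : Int) : List Int :=
  pvClimb path_from (path_from.length + 1) end_ []

-- ===== PRECONDITION & SPEC =====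
-- Decidable shape condition on the input: following first-match parent pointers from n,
-- every lookup succeeds and a self-parent node is reached within the given number of
-- steps.  It computes no path; it is the minimal statement that end_'s ancestor chain
-- is well-founded, which no bound/membership formula expresses.
def pvChainOk (path_from : List (Int × Int)) : Nat → Int → Bool
  | 0, _ => false
  | fuel + 1, n =>
    match (PySem.Dict.mk path_from).get? n with
    | none => false
    | some p => if p = n then true else pvChainOk path_from fuel p

-- Pre_ excludes exactly the inputs on which A raises KeyError or loops forever:
-- the parent chain from end_ must reach a fixed point (a self-parent root).
def Pre_rebuild_path (path_from : List (Int × Int)) (end_ : Int) : Prop :=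
  pvChainOk path_from (path_from.length + 1) end_ = true
instance (path_from : List (Int × Int)) (end_ : Int) : Decidable (Pre_rebuild_path path_from end_) := by unfold Pre_rebuild_path; infer_instance

def pvWitness_rebuild_path : (List (Int × Int)) × Int := ([(1, 1), (2, 1), (3, 2)], 3)

def Spec_rebuild_path (path_from : List (Int × Int)) (end_ : Int) (out : List Int) : Prop := out = rebuild_path_alt path_from end_
instance (path_from : List (Int × Int)) (end_ : Int) (out : List Int) : Decidable (Spec_rebuild_path path_from end_ out) := by unfold Spec_rebuild_path; infer_instance

-- ===== CLAIM =====
def Claim_equal_rebuild_path : Prop := ∀ (path_from : List (Int × Int)) (end_ : Int), Dom_rebuild_path path_from end_ → Pre_rebuild_path path_from end_ → Spec_rebuild_path path_from end_ (rebuild_path path_from end_)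

-- ===== LEMMAS AND PROOFS =====

-- B's lookup (first matching pair) is A's dict lookup
theorem pvFind_eq_get (path_from : List (Int × Int)) (n : Int) :
    (path_from.find? (fun kv => kv.1 == n)).map Prod.snd
      = (PySem.Dict.mk path_from).get? n := by
  induction path_from with
  | nil => simp [PySem.Dict.get?]
  | cons kv rest ih =>
    rw [PySem.Dict.get?_mk_cons]
    by_cases h : kv.1 == n
    · simp [List.find?, h]
    · simp only [List.find?, h]
      simpa using ih

-- the accumulator of A's loop is a prefix: it can be pulled out
theorem pvALoop_acc (path_from : List (Int × Int)) :
    ∀ (fuel : Nat) (n : Int) (acc : List Int),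
      pvALoop path_from fuel n acc = acc ++ pvALoop path_from fuel n [] := by
  intro fuel
  induction fuel with
  | zero => intro n acc; simp [pvALoop]
  | succ fuel ih =>
    intro n acc
    simp only [pvALoop]
    cases h : (PySem.Dict.mk path_from).get? n with
    | none => simp
    | some p =>
      by_cases hp : n = p
      · simp [hp]
      · simp only [if_neg hp]
        rw [ih p (acc ++ [p]), ih p ([] ++ [p])]
        simp

-- on a terminating chain, B's climb produces A's loop output reversed, then the
-- start node, then the accumulator
theorem pvClimb_eq (path_from : List (Int × Int)) :
    ∀ (fuel : Nat) (n : Int) (acc : List Int), pvChainOk path_from fuel n = true →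
      pvClimb path_from fuel n acc = (pvALoop path_from fuel n []).reverse ++ n :: acc := by
  intro fuel
  induction fuel with
  | zero => intro n acc h; simp [pvChainOk] at h
  | succ fuel ih =>
    intro n acc h
    simp only [pvClimb, pvFind_eq_get, pvALoop]
    cases hl : (PySem.Dict.mk path_from).get? n with
    | none => simp [pvChainOk, hl] at h
    | some p =>
      by_cases hp : p = n
      · simp [hp]
      · have hn : ¬ n = p := fun e => hp e.symm
        simp only [Option.elim_some, if_neg hp, if_neg hn]
        simp only [pvChainOk, hl, if_neg hp] at h
        rw [ih p (n :: acc) h, pvALoop_acc path_from fuel p ([] ++ [p])]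
        simp

-- ===== VERDICT =====
theorem rebuild_path_spec : Claim_equal_rebuild_path := by
  intro path_from end_ _ hpre
  unfold Spec_rebuild_path rebuild_path rebuild_path_alt
  rw [pvClimb_eq path_from _ _ [] hpre, pvALoop_acc path_from _ end_ [end_]]
  simp
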